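-- pv_equiv track=rewrite | github.com/Nabeel-26/MapUp-DA-Assessment-2024 | MapUp-DA-Assessment-2024/submissions/python_section_1.py | rotate_and_multiply_matrix
-- ===== SOURCE A (Python) =====
-- from typing import Dict, List
--
-- def rotate_and_multiply_matrix(matrix: List[List[int]]) -> List[List[int]]:
--     """
--     Rotate the given matrix by 90 degrees clockwise, then multiply each element
--     by the sum of its original row and column index before rotation.
--
--     Args:
--     - matrix (List[List[int]]): 2D list representing the matrix to be transformed.
--
--     Returns:
--     - List[List[int]]: A new 2D list representing the transformed matrix.
--     """
--     # Your code here
--     n = len(matrix)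
--
--     rotated = [[matrix[n - j - 1][i] for j in range(n)] for i in range(n)]
--
--     final_matrix = [[0] * n for _ in range(n)]
--
--     for i in range(n):
--         for j in range(n):
--             row_sum = sum(rotated[i])
--             col_sum = sum(rotated[k][j] for k in range(n))
--             final_matrix[i][j] = row_sum + col_sum - rotated[i][j]
--
--     return final_matrix
-- ===== SOURCE B (Python) =====
-- from typing import List
--
-- def rotate_and_multiply_matrix(matrix: List[List[int]]) -> List[List[int]]:
--     n = len(matrix)
--     rotated = [[matrix[n - j - 1][i] for j in range(n)] for i in range(n)]
--     row_sums = [sum(r) for r in rotated]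
--     col_sums = [sum(r[j] for r in rotated) for j in range(n)]
--     return [[row_sums[i] + col_sums[j] - rotated[i][j] for j in range(n)]
--             for i in range(n)]
-- ===== Notes on version B (the rewrite author's own statement) =====
-- stated objective: faster
-- what changed: B precomputes the rotated matrix's row sums and column sums once and fills each cell by lookup, instead of A's re-summing a whole row and a whole column for every cell.
import Mathlib
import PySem

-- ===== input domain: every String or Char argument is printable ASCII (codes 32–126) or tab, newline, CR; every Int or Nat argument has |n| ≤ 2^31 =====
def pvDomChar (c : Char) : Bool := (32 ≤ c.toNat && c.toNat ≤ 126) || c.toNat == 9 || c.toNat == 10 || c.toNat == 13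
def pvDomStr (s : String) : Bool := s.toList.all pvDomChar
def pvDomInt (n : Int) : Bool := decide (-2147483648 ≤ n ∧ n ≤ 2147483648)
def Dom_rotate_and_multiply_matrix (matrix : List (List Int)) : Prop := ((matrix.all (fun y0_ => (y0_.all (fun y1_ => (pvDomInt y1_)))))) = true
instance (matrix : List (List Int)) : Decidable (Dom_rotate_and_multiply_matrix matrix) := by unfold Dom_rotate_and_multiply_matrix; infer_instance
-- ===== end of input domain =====

-- B precomputes the row sums and column sums of the rotated matrix once (O(n^2))
-- instead of re-summing a row and a column for every cell as A does (O(n^3)).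

-- ===== PORT A =====
-- shared line of both Pythons: rotated = [[matrix[n-j-1][i] for j in range(n)] for i in range(n)]
def pvRotated (matrix : List (List Int)) : List (List Int) :=
  let n : Int := matrix.length
  (PySem.List.pyRange 0 n).map (fun i =>
    (PySem.List.pyRange 0 n).map (fun j =>
      PySem.List.pyGetD (PySem.List.pyGetD matrix (n - j - 1) []) i 0))

def rotate_and_multiply_matrix (matrix : List (List Int)) : List (List Int) :=
  let n : Int := matrix.length
  let rotated := pvRotated matrix
  (PySem.List.pyRange 0 n).map (fun i =>
    (PySem.List.pyRange 0 n).map (fun j =>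
      let row_sum := (PySem.List.pyGetD rotated i ([] : List Int)).sum
      let col_sum := ((PySem.List.pyRange 0 n).map (fun k =>
        PySem.List.pyGetD (PySem.List.pyGetD rotated k ([] : List Int)) j 0)).sum
      row_sum + col_sum - PySem.List.pyGetD (PySem.List.pyGetD rotated i ([] : List Int)) j 0))

-- ===== PORT B =====
def rotate_and_multiply_matrix_alt (matrix : List (List Int)) : List (List Int) :=
  let n : Int := matrix.length
  let rotated := pvRotated matrix
  let row_sums := rotated.map List.sum
  let col_sums := (PySem.List.pyRange 0 n).map (fun j =>
    (rotated.map (fun r => PySem.List.pyGetD r j 0)).sum)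
  (PySem.List.pyRange 0 n).map (fun i =>
    (PySem.List.pyRange 0 n).map (fun j =>
      PySem.List.pyGetD row_sums i 0 + PySem.List.pyGetD col_sums j 0
        - PySem.List.pyGetD (PySem.List.pyGetD rotated i ([] : List Int)) j 0))

-- ===== PRECONDITION & SPEC =====
-- Pre_ excludes exactly the ragged inputs on which A raises IndexError:
-- matrix[n-j-1][i] needs every row to have at least n = len(matrix) entries.
def Pre_rotate_and_multiply_matrix (matrix : List (List Int)) : Prop :=
  ∀ row ∈ matrix, matrix.length ≤ row.length
instance (matrix : List (List Int)) : Decidable (Pre_rotate_and_multiply_matrix matrix) := by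
  unfold Pre_rotate_and_multiply_matrix; infer_instance

def pvWitness_rotate_and_multiply_matrix : List (List Int) := [[1, 2], [3, 4]]

def Spec_rotate_and_multiply_matrix (matrix : List (List Int)) (out : List (List Int)) : Prop := out = rotate_and_multiply_matrix_alt matrix
instance (matrix : List (List Int)) (out : List (List Int)) : Decidable (Spec_rotate_and_multiply_matrix matrix out) := by unfold Spec_rotate_and_multiply_matrix; infer_instance

-- ===== CLAIM (what is proved, stated in full; the proofs are below) =====
def Claim_equal_rotate_and_multiply_matrix : Prop := ∀ (matrix : List (List Int)), Dom_rotate_and_multiply_matrix matrix → Pre_rotate_and_multiply_matrix matrix → Spec_rotate_and_multiply_matrix matrix (rotate_and_multiply_matrix matrix)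

-- ===== LEMMAS AND PROOFS =====

theorem pvRotated_length (matrix : List (List Int)) :
    (pvRotated matrix).length = matrix.length := by
  simp [pvRotated, PySem.List.length_pyRange_one]

theorem rotate_and_multiply_eq (matrix : List (List Int)) :
    rotate_and_multiply_matrix matrix = rotate_and_multiply_matrix_alt matrix := by
  simp only [rotate_and_multiply_matrix, rotate_and_multiply_matrix_alt]
  apply List.map_congr_left
  intro i hi
  apply List.map_congr_left
  intro j hj
  rw [PySem.List.mem_pyRange_one] at hi hj
  -- the three terms of every cell agree
  have hrow : PySem.List.pyGetD ((pvRotated matrix).map List.sum) i 0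
      = (PySem.List.pyGetD (pvRotated matrix) i ([] : List Int)).sum := by
    have := PySem.List.pyGetD_map (List.sum) (pvRotated matrix) i ([] : List Int)
    simpa using this
  have hkmap : (PySem.List.pyRange 0 (matrix.length : Int)).map
      (fun k => PySem.List.pyGetD (PySem.List.pyGetD (pvRotated matrix) k ([] : List Int)) j 0)
      = (pvRotated matrix).map (fun r => PySem.List.pyGetD r j 0) := by
    have h1 : (PySem.List.pyRange 0 (matrix.length : Int)).map
        (fun k => PySem.List.pyGetD (pvRotated matrix) k ([] : List Int)) = pvRotated matrix := by
      have := PySem.List.map_pyGetD_pyRange_zero' (pvRotated matrix) ([] : List Int)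
      rwa [pvRotated_length] at this
    calc (PySem.List.pyRange 0 (matrix.length : Int)).map
          (fun k => PySem.List.pyGetD (PySem.List.pyGetD (pvRotated matrix) k ([] : List Int)) j 0)
        = ((PySem.List.pyRange 0 (matrix.length : Int)).map
            (fun k => PySem.List.pyGetD (pvRotated matrix) k ([] : List Int))).map
            (fun r => PySem.List.pyGetD r j 0) := by rw [List.map_map]; rfl
      _ = (pvRotated matrix).map (fun r => PySem.List.pyGetD r j 0) := by rw [h1]
  have hcol : PySem.List.pyGetD ((PySem.List.pyRange 0 (matrix.length : Int)).map
        (fun j' => ((pvRotated matrix).map (fun r => PySem.List.pyGetD r j' 0)).sum)) j 0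
      = ((PySem.List.pyRange 0 (matrix.length : Int)).map
          (fun k => PySem.List.pyGetD (PySem.List.pyGetD (pvRotated matrix) k ([] : List Int)) j 0)).sum := by
    have hj' : j = ((j.toNat : Nat) : Int) := by omega
    have hk : j.toNat < matrix.length := by omega
    rw [hkmap, hj',
      PySem.List.pyGetD_map_pyRange
        (fun j' => ((pvRotated matrix).map (fun r => PySem.List.pyGetD r j' 0)).sum)
        matrix.length j.toNat 0 hk]
  rw [hrow, hcol]

-- ===== VERDICT (by name: the statement is the Claim_ definition above) =====
theorem rotate_and_multiply_matrix_spec : Claim_equal_rotate_and_multiply_matrix := by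
  intro matrix _ _
  unfold Spec_rotate_and_multiply_matrix
  exact rotate_and_multiply_eq matrix
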